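-- pv_equiv track=rewrite | github.com/marcopoli/aclpub2 | aclpub2/templates.py | group_by_last_name
-- ===== SOURCE A (Python) =====
-- from collections import defaultdict
-- from typing import List, Any
--
-- def group_by_last_name(names: List[str]) -> List[List[str]]:
--     alphabetized_names = defaultdict(list)
--     for name in names:
--         last_name = name.split(" ")[-1]
--         alphabetized_names[last_name[0].lower()].append(name)
--     output = []
--     letters = list(alphabetized_names.keys())
--     letters.sort()
--     for letter in letters:
--         output.append(alphabetized_names[letter])
--     return output
-- ===== SOURCE B (Python) =====
-- def group_by_last_name(names):
--     def key(name):
--         return name.split(" ")[-1][0].lower()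
--     letters = sorted({key(n) for n in names})
--     return [[n for n in names if key(n) == c] for c in letters]
-- ===== Notes on version B (the rewrite author's own statement) =====
-- stated objective: simpler
-- what changed: B drops A's defaultdict bucket-building and key-sort entirely: it computes the sorted set of last-name initials once and emits one stable filter pass over the input per initial.
import Mathlib
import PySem

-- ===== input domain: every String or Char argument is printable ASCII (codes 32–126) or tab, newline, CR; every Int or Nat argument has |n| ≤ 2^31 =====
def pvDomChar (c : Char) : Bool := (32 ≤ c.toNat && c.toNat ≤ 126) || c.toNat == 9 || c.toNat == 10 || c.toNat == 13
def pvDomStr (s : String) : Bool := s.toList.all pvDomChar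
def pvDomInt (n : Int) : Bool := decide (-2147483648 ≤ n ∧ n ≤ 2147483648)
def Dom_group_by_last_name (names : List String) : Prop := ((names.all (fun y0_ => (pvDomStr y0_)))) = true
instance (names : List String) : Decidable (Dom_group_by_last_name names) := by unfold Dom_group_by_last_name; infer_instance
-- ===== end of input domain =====

-- B replaces A's bucket dict + key sort by one sorted set of initials and a filter pass per
-- initial — no dict is maintained (objective: simpler/alternative, not claimed faster).

-- shared key expression of both Pythons: name.split(" ")[-1][0].lower()
-- (none exactly where Python raises IndexError: the last space-split token is empty)
def pvLastInitial? (name : String) : Option Char :=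
  match PySem.List.pyGet? (PySem.Chars.splitOn name.toList [' ']) (-1) with
  | some tok => (PySem.List.pyGet? tok 0).map PySem.Chars.lowerChar
  | none => none

-- ===== PORT A =====
def group_by_last_name (names : List String) : List (List String) :=
  let d : PySem.Dict Char (List String) :=
    names.foldl (fun d name =>
      match pvLastInitial? name with
      | some c => d.modify c [] (· ++ [name])   -- defaultdict(list): d[c].append(name)
      | none => d)                              -- IndexError in Python: excluded by Pre_
      PySem.Dict.empty
  let letters := PySem.List.sorted d.keys (fun x => x) false
  letters.foldl (fun output letter => output ++ [d.getD letter []]) []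

-- ===== PORT B =====
def group_by_last_name_alt (names : List String) : List (List String) :=
  let keyOf : String → Char := fun n => (pvLastInitial? n).getD ' '  -- Pre_ guarantees some; default unreachable
  let letters := PySem.List.sorted (PySem.Set.ofList (names.map keyOf)) (fun x => x) false
  letters.map (fun c => names.filter (fun n => keyOf n == c))

-- ===== PRECONDITION & SPEC =====
-- Pre_ excludes exactly the names whose last space-split token is empty ("" or trailing ' '):
-- there both Pythons raise IndexError on name.split(" ")[-1][0].
def Pre_group_by_last_name (names : List String) : Prop :=
  ∀ name ∈ names, (PySem.Chars.splitOn name.toList [' ']).getLast?.getD [] ≠ []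
instance (names : List String) : Decidable (Pre_group_by_last_name names) := by unfold Pre_group_by_last_name; infer_instance

def pvWitness_group_by_last_name : List String := ["Ada Lovelace", "Alan Turing", "Grace Hopper", "lovelace"]

def Spec_group_by_last_name (names : List String) (out : List (List String)) : Prop := out = group_by_last_name_alt names
instance (names : List String) (out : List (List String)) : Decidable (Spec_group_by_last_name names out) := by unfold Spec_group_by_last_name; infer_instance

-- ===== CLAIM (what is proved, stated in full; the proofs are below) =====
def Claim_equal_group_by_last_name : Prop := ∀ (names : List String), Dom_group_by_last_name names → Pre_group_by_last_name names → Spec_group_by_last_name names (group_by_last_name names)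

-- ===== LEMMAS AND PROOFS =====

theorem pvLastInitial_some (name : String)
    (h : (PySem.Chars.splitOn name.toList [' ']).getLast?.getD [] ≠ []) :
    pvLastInitial? name = some ((pvLastInitial? name).getD ' ') := by
  unfold pvLastInitial?
  rw [PySem.List.pyGet?_neg_one]
  cases htok : (PySem.Chars.splitOn name.toList [' ']).getLast? with
  | none => simp [htok] at h
  | some tok =>
    rw [htok] at h
    simp only [Option.getD_some] at h
    cases tok with
    | nil => exact absurd rfl h
    | cons c cs => simp [PySem.List.pyGet?, PySem.List.pyIdx?]

theorem group_by_last_name_main (names : List String)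
    (hpre : Pre_group_by_last_name names) :
    group_by_last_name names = group_by_last_name_alt names := by
  unfold group_by_last_name group_by_last_name_alt
  set k : String → Char := fun n => (pvLastInitial? n).getD ' ' with hk
  -- A's bucket loop is a modify-loop keyed by k
  have hfold :
      names.foldl (fun d name =>
        match pvLastInitial? name with
        | some c => d.modify c [] (· ++ [name])
        | none => d) PySem.Dict.empty
      = names.foldl (fun d name => d.modify (k name) [] (· ++ [name])) PySem.Dict.empty := by
    apply PySem.List.foldl_congr_mem
    intro acc x hx
    rw [pvLastInitial_some x (hpre x hx)]
  rw [hfold]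
  set d := names.foldl (fun d name => d.modify (k name) [] (· ++ [name])) PySem.Dict.empty with hd
  have hkeys : d.keys = PySem.Set.ofList (names.map k) := by
    rw [hd, PySem.Dict.keys_foldl_modify_key]
    rfl
  have hgetD : ∀ c, d.getD c [] = names.filter (fun n => k n == c) := by
    intro c
    have hpair : d = (names.map (fun n => ((k n, n) : Char × String))).foldl
        (fun d p => d.modify p.1 [] (· ++ [p.2])) PySem.Dict.empty := by
      rw [hd, List.foldl_map]
    rw [hpair, PySem.Dict.getD_foldl_modify_append, List.filter_map]
    simp [Function.comp_def]
  show (PySem.List.sorted d.keys (fun x => x) false).foldl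
      (fun output letter => output ++ [d.getD letter []]) []
    = (PySem.List.sorted (PySem.Set.ofList (names.map k)) (fun x => x) false).map
      (fun c => names.filter (fun n => k n == c))
  rw [hkeys, PySem.List.foldl_append_singleton_eq_map]
  simp only [List.nil_append]
  exact List.map_congr_left (fun c _ => hgetD c)

-- ===== VERDICT (by name: the statement is the Claim_ definition above) =====
theorem group_by_last_name_spec : Claim_equal_group_by_last_name := by
  intro names _ hpre
  unfold Spec_group_by_last_name
  exact group_by_last_name_main names hpre
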